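-- pv_equiv track=rewrite | github.com/Ren-Xuan/LeetCode | 1589-m差分数组-maxSumRangeQuery.py | maxSumRangeQuery2
-- ===== SOURCE A (Python) =====
-- from typing import List
-- import heapq
--
-- def maxSumRangeQuery2(nums: List[int], requests: List[List[int]]) -> int:
--     nums.sort(reverse = True)
--     countArr = [0]*len(nums)
--     for e in requests:#复杂度太高
--         for i in range(e[0],e[1]+1):
--             countArr[i]+=1
--     indexPq = []
--     result  = 0
--     for i,e in enumerate(countArr):
--         heapq.heappush(indexPq,(-e,i))
--     for i in range(len(indexPq)):
--         result+=(-heapq.heappop(indexPq)[0])*nums[i]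
--     return result%(10**9+7)
-- ===== SOURCE B (Python) =====
-- from typing import List
--
-- def maxSumRangeQuery2(nums: List[int], requests: List[List[int]]) -> int:
--     # Difference array for the per-index request counts (O(n+q) instead of O(n*q)),
--     # then pair ascending-sorted counts with ascending-sorted nums.
--     n = len(nums)
--     diff = [0] * (n + 1)
--     for e in requests:
--         l, r = e[0], e[1]
--         if l <= r:
--             diff[l] += 1
--             diff[r + 1] -= 1
--     counts = []
--     c = 0
--     for i in range(n):
--         c += diff[i]
--         counts.append(c)
--     counts.sort()
--     nums.sort()
--     return sum(c * v for c, v in zip(counts, nums)) % (10**9 + 7)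
-- ===== Notes on version B (the rewrite author's own statement) =====
-- stated objective: faster
-- what changed: B replaces A's per-request inner loop over every covered index with an O(n+q) difference array plus one prefix-sum pass, and replaces A's heap push/pop of (-count, index) pairs with sorting the counts and pairing them with nums sorted the same (ascending) way.
-- outside the precondition, e.g. on maxSumRangeQuery2([1, 2], [[-1, 0]]): A returns 3, B returns 1000000006
import Mathlib
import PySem

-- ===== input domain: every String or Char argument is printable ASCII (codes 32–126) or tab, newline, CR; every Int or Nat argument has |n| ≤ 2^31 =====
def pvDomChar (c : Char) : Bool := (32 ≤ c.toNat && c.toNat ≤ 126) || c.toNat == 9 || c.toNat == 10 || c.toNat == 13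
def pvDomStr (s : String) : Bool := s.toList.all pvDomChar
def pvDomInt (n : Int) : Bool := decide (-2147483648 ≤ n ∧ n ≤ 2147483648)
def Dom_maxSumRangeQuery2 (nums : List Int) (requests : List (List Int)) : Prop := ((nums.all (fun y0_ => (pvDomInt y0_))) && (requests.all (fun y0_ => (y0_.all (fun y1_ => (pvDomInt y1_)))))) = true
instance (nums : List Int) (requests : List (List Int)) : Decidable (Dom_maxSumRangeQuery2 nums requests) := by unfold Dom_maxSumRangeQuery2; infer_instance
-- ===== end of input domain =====

-- B replaces A's per-request inner loop by a difference array and A's heap by sorting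
-- counts, pairing ascending with ascending nums: asymptotically faster count phase.
-- Both A and B sort `nums` in place in Python (A descending, B ascending); the
-- equivalence proved here is about the RETURN value only.

-- ===== PORT A =====
-- countArr[i] += 1 (Python index semantics: negative wraps, out of range raises — pyGetD/pySetD)
def pvInc (ca : List Int) (i : Int) : List Int :=
  PySem.List.pySetD ca i (PySem.List.pyGetD ca i 0 + 1)

-- A's inner loop: for i in range(e[0], e[1]+1): countArr[i] += 1
def pvCountStep (ca : List Int) (e : List Int) : List Int :=
  (PySem.List.pyRange (PySem.List.pyGetD e 0 0) (PySem.List.pyGetD e 1 0 + 1) 1).foldl pvInc ca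

-- heapq on pairs, modelled as a multiset (list): heappush appends, heappop extracts the
-- lexicographically smallest pair — exactly the values heapq's push/pop compute.
def pvPairLe (a b : Int × Int) : Bool := a.1 < b.1 || (a.1 == b.1 && a.2 ≤ b.2)

def pvHeapMin (x : Int × Int) (l : List (Int × Int)) : Int × Int :=
  l.foldl (fun m y => if pvPairLe m y then m else y) x

def pvHeapPop? : List (Int × Int) → Option ((Int × Int) × List (Int × Int))
  | [] => none
  | x :: l => let m := pvHeapMin x l; some (m, (x :: l).erase m)

def maxSumRangeQuery2 (nums : List Int) (requests : List (List Int)) : Int :=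
  let nums1 := PySem.List.sorted nums (fun x => x) true        -- nums.sort(reverse=True)
  let countArr := requests.foldl pvCountStep (List.replicate nums1.length 0)
  let indexPq := (PySem.List.enumerate countArr 0).foldl
      (fun pq p => pq ++ [((-p.2 : Int), p.1)]) []             -- heappush(indexPq, (-e, i))
  let st := (PySem.List.pyRange 0 (PySem.List.len indexPq) 1).foldl
      (fun (st : Int × List (Int × Int)) i =>
        match pvHeapPop? st.2 with
        | some (m, rest) => (st.1 + (-m.1) * PySem.List.pyGetD nums1 i 0, rest)
        | none => st) ((0 : Int), indexPq)
  PySem.Int.mod st.1 1000000007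

-- ===== PORT B =====
-- diff[i] += v
def pvBump (d : List Int) (i v : Int) : List Int :=
  PySem.List.pySetD d i (PySem.List.pyGetD d i 0 + v)

-- B's per-request step: if l <= r: diff[l] += 1; diff[r+1] -= 1
def pvDiffStep (d : List Int) (e : List Int) : List Int :=
  let l := PySem.List.pyGetD e 0 0
  let r := PySem.List.pyGetD e 1 0
  if l ≤ r then pvBump (pvBump d l 1) (r + 1) (-1) else d

def maxSumRangeQuery2_alt (nums : List Int) (requests : List (List Int)) : Int :=
  let n := nums.length
  let diff := requests.foldl pvDiffStep (List.replicate (n + 1) 0)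
  let cst := (PySem.List.pyRange 0 (n : Int) 1).foldl
      (fun (st : List Int × Int) i =>
        let c := st.2 + PySem.List.pyGetD diff i 0
        (st.1 ++ [c], c)) ([], 0)
  let counts := PySem.List.sorted cst.1 (fun x => x) false     -- counts.sort()
  let nums1 := PySem.List.sorted nums (fun x => x) false       -- nums.sort()
  PySem.Int.mod ((counts.zip nums1).map (fun p => p.1 * p.2)).sum 1000000007

-- ===== PRECONDITION & SPEC =====
-- Pre_ excludes requests shorter than two entries (A raises IndexError) and non-empty
-- request ranges reaching outside [0, len(nums)) : there A either raises IndexError or,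
-- for a negative left endpoint, returns a value produced by Python's negative-index
-- wraparound, which B does not reproduce.  Empty ranges (e[0] > e[1]) are admitted.
def Pre_maxSumRangeQuery2 (nums : List Int) (requests : List (List Int)) : Prop :=
  ∀ e ∈ requests, 2 ≤ e.length ∧
    (e.getD 0 0 ≤ e.getD 1 0 → 0 ≤ e.getD 0 0 ∧ e.getD 1 0 < (nums.length : Int))
instance (nums : List Int) (requests : List (List Int)) : Decidable (Pre_maxSumRangeQuery2 nums requests) := by unfold Pre_maxSumRangeQuery2; infer_instance

def pvWitness_maxSumRangeQuery2 : List Int × List (List Int) := ([3, 1, 2], [[0, 1], [1, 2], [2, 0]])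

def Spec_maxSumRangeQuery2 (nums : List Int) (requests : List (List Int)) (out : Int) : Prop := out = maxSumRangeQuery2_alt nums requests
instance (nums : List Int) (requests : List (List Int)) (out : Int) : Decidable (Spec_maxSumRangeQuery2 nums requests out) := by unfold Spec_maxSumRangeQuery2; infer_instance

-- ===== CLAIM (what is proved, stated in full; the proofs are below) =====
def Claim_equal_maxSumRangeQuery2 : Prop := ∀ (nums : List Int) (requests : List (List Int)), Dom_maxSumRangeQuery2 nums requests → Pre_maxSumRangeQuery2 nums requests → Spec_maxSumRangeQuery2 nums requests (maxSumRangeQuery2 nums requests)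

-- ===== LEMMAS AND PROOFS =====



theorem pv_sum_take_set (xs : List Int) (k : Nat) (v : Int) (m : Nat) (hk : k < xs.length) :
    ((xs.set k (xs.getD k 0 + v)).take m).sum = (xs.take m).sum + (if k < m then v else 0) := by
  induction xs generalizing k m with
  | nil => simp at hk
  | cons x xs ih =>
    cases k with
    | zero =>
      cases m with
      | zero => simp
      | succ m => simp [List.getD]; ring
    | succ k =>
      cases m with
      | zero => simp
      | succ m =>
        simp only [List.set_cons_succ, List.take_succ_cons, List.sum_cons, List.getD_cons_succ]
        rw [ih k m (by simpa using hk)]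
        by_cases h : k < m <;> simp [h] <;> ring

-- pvBump on an in-range nonnegative index is a set
theorem pv_bump_eq_set (d : List Int) (i v : Int) (h0 : 0 ≤ i) (h1 : i < (d.length : Int)) :
    pvBump d i v = d.set i.toNat (d.getD i.toNat 0 + v) := by
  unfold pvBump
  rw [PySem.List.pySetD_of_nonneg _ _ h0,
    PySem.List.pyGetD_eq_getElem d 0 h0 h1, List.getD_eq_getElem _ _ (by omega)]

theorem pv_bump_length (d : List Int) (i v : Int) : (pvBump d i v).length = d.length := by
  unfold pvBump; rw [PySem.List.length_pySetD]

theorem pv_sum_take_bump (d : List Int) (i v : Int) (m : Nat) (h0 : 0 ≤ i) (h1 : i < (d.length : Int)) :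
    ((pvBump d i v).take m).sum = (d.take m).sum + (if i < (m : Int) then v else 0) := by
  rw [pv_bump_eq_set d i v h0 h1, pv_sum_take_set d i.toNat v m (by omega)]
  congr 1
  by_cases h : i.toNat < m <;> by_cases h' : i < (m : Int) <;> simp [h, h'] <;> omega

-- A's inner loop over range(l, r+1) increments exactly the entries l..r
theorem pv_incRange_spec (r : Int) (l : Int) (ca : List Int) (h0 : 0 ≤ l) (h1 : r < (ca.length : Int)) :
    ((PySem.List.pyRange l (r + 1) 1).foldl pvInc ca).length = ca.length ∧
      ∀ j : Nat, j < ca.length →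
        ((PySem.List.pyRange l (r + 1) 1).foldl pvInc ca).getD j 0
          = ca.getD j 0 + (if l ≤ (j : Int) ∧ (j : Int) ≤ r then 1 else 0) := by
  by_cases hlr : r + 1 ≤ l
  · rw [PySem.List.pyRange_one_eq_nil hlr]
    refine ⟨rfl, fun j hj => ?_⟩
    have : ¬(l ≤ (j : Int) ∧ (j : Int) ≤ r) := by omega
    simp [this]
  · -- l ≤ r
    have hstep : pvInc ca l = ca.set l.toNat (ca.getD l.toNat 0 + 1) :=
      pv_bump_eq_set ca l 1 h0 (by omega)
    rw [PySem.List.pyRange_one_cons (by omega : l < r + 1)]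
    simp only [List.foldl_cons, hstep]
    have hlen : (ca.set l.toNat (ca.getD l.toNat 0 + 1)).length = ca.length := by simp
    have ih := pv_incRange_spec r (l + 1) (ca.set l.toNat (ca.getD l.toNat 0 + 1)) (by omega) (by omega)
    refine ⟨by rw [ih.1, hlen], fun j hj => ?_⟩
    rw [ih.2 j (by omega)]
    have hget : (ca.set l.toNat (ca.getD l.toNat 0 + 1)).getD j 0
        = ca.getD j 0 + (if (j : Int) = l then 1 else 0) := by
      by_cases h : j = l.toNat
      · subst h
        have hlt : l.toNat < ca.length := by omega
        have hceq : ((l.toNat : Nat) : Int) = l := by omega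
        rw [List.getD_eq_getElem _ _ (by simpa using hlt)]
        simp [hceq, List.getElem_set_self (by simpa using hlt)]
      · have : ¬((j : Int) = l) := by omega
        simp [List.getD, List.getElem?_set_ne (by omega : l.toNat ≠ j), this]
    rw [hget]
    by_cases hc1 : l + 1 ≤ (j : Int) ∧ (j : Int) ≤ r <;>
      by_cases hc2 : l ≤ (j : Int) ∧ (j : Int) ≤ r <;>
      by_cases hc3 : (j : Int) = l <;>
      simp [hc1, hc2, hc3] <;> omega
termination_by (r + 1 - l).toNat
decreasing_by omega

-- the invariant tying B's difference array to A's count array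
def pvInv (n : Nat) (d ca : List Int) : Prop :=
  d.length = n + 1 ∧ ca.length = n ∧ ∀ j : Nat, j < n → (d.take (j + 1)).sum = ca.getD j 0

theorem pv_step_inv (n : Nat) (d ca : List Int) (e : List Int)
    (he2 : 2 ≤ e.length)
    (heb : e.getD 0 0 ≤ e.getD 1 0 → 0 ≤ e.getD 0 0 ∧ e.getD 1 0 < (n : Int))
    (h : pvInv n d ca) : pvInv n (pvDiffStep d e) (pvCountStep ca e) := by
  obtain ⟨hd, hca, hpre⟩ := h
  have hg0 : PySem.List.pyGetD e 0 0 = e.getD 0 0 := PySem.List.pyGetD_zero e 0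
  have hg1 : PySem.List.pyGetD e 1 0 = e.getD 1 0 := PySem.List.pyGetD_ofNat' e 1 0
  have hcnt : pvCountStep ca e =
      (PySem.List.pyRange (e.getD 0 0) (e.getD 1 0 + 1) 1).foldl pvInc ca := by
    simp only [pvCountStep, hg0, hg1]
  by_cases hlr : e.getD 0 0 ≤ e.getD 1 0
  · obtain ⟨h0, h1⟩ := heb hlr
    have hspec := pv_incRange_spec (e.getD 1 0) (e.getD 0 0) ca h0 (by omega)
    have hstep : pvDiffStep d e = pvBump (pvBump d (e.getD 0 0) 1) (e.getD 1 0 + 1) (-1) := by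
      simp only [pvDiffStep, hg0, hg1, if_pos hlr]
    refine ⟨?_, ?_, ?_⟩
    · rw [hstep, pv_bump_length, pv_bump_length, hd]
    · rw [hcnt, hspec.1, hca]
    · intro j hj
      rw [hstep, hcnt,
        pv_sum_take_bump _ (e.getD 1 0 + 1) (-1) (j + 1) (by omega) (by rw [pv_bump_length]; omega),
        pv_sum_take_bump d (e.getD 0 0) 1 (j + 1) h0 (by omega),
        hspec.2 j (by omega), ← hpre j hj]
      split_ifs with c1 c2 c3 c4 c5 <;> omega
  · have hstep : pvDiffStep d e = d := by
      simp only [pvDiffStep, hg0, hg1, if_neg hlr]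
    rw [hstep, hcnt, PySem.List.pyRange_one_eq_nil (by omega : e.getD 1 0 + 1 ≤ e.getD 0 0)]
    exact ⟨hd, hca, hpre⟩

theorem pv_fold_inv (n : Nat) (reqs : List (List Int)) (d ca : List Int)
    (hp : ∀ e ∈ reqs, 2 ≤ e.length ∧
      (e.getD 0 0 ≤ e.getD 1 0 → 0 ≤ e.getD 0 0 ∧ e.getD 1 0 < (n : Int)))
    (h : pvInv n d ca) :
    pvInv n (reqs.foldl pvDiffStep d) (reqs.foldl pvCountStep ca) := by
  induction reqs generalizing d ca with
  | nil => simpa using h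
  | cons e reqs ih =>
    simp only [List.foldl_cons]
    exact ih _ _ (fun x hx => hp x (by simp [hx]))
      (pv_step_inv n d ca e (hp e (by simp)).1 (hp e (by simp)).2 h)

theorem pv_init_inv (n : Nat) : pvInv n (List.replicate (n + 1) 0) (List.replicate n 0) := by
  refine ⟨by simp, by simp, fun j hj => ?_⟩
  rw [List.take_replicate, List.getD_eq_getElem _ _ (by simpa using hj)]
  simp

theorem pv_sum_take_succ (d : List Int) (k : Nat) :
    (d.take (k + 1)).sum = (d.take k).sum + d.getD k 0 := by
  rw [List.take_succ, List.sum_append]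
  cases h : d[k]? <;> simp [List.getD, h]

theorem pv_prefix_loop (d : List Int) (n : Nat) :
    ((PySem.List.pyRange 0 (n : Int) 1).foldl
        (fun (st : List Int × Int) i =>
          (st.1 ++ [st.2 + PySem.List.pyGetD d i 0], st.2 + PySem.List.pyGetD d i 0))
        (([] : List Int), (0 : Int)))
      = ((List.range n).map (fun j => (d.take (j + 1)).sum), (d.take n).sum) := by
  induction n with
  | zero => simp [PySem.List.pyRange_one_eq_nil (by omega : (0:Int) ≤ 0)]
  | succ n ih =>
    have hc : ((n + 1 : Nat) : Int) = (n : Int) + 1 := by push_cast; ring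
    rw [hc, PySem.List.pyRange_one_succ_right (by positivity), List.foldl_append, ih]
    simp only [List.foldl_cons, List.foldl_nil, List.range_succ, List.map_append, List.map_cons,
      List.map_nil, PySem.List.pyGetD_natCast]
    simp [pv_sum_take_succ d n]

theorem pv_counts_eq (nums : List Int) (requests : List (List Int))
    (hpre : Pre_maxSumRangeQuery2 nums requests) :
    (List.range nums.length).map
        (fun j => (((requests.foldl pvDiffStep (List.replicate (nums.length + 1) 0)).take (j + 1)).sum))
      = requests.foldl pvCountStep (List.replicate nums.length 0) := by
  have hinv := pv_fold_inv nums.length requests _ _ hpre (pv_init_inv nums.length)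
  obtain ⟨hd, hca, hp⟩ := hinv
  apply List.ext_getElem (by simpa using hca.symm)
  intro j h1 h2
  have hj : j < nums.length := by simpa using h1
  simp only [List.getElem_map, List.getElem_range]
  rw [hp j hj, List.getD_eq_getElem _ _ (by omega)]

-- the lexicographic order heapq uses on the pushed pairs, as a Prop
def pvPLe (a b : Int × Int) : Prop := a.1 < b.1 ∨ (a.1 = b.1 ∧ a.2 ≤ b.2)

theorem pvPairLe_iff (a b : Int × Int) : pvPairLe a b = true ↔ pvPLe a b := by
  simp [pvPairLe, pvPLe]

theorem pvPLe_refl (a : Int × Int) : pvPLe a a := by simp [pvPLe]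

theorem pvPLe_trans {a b c : Int × Int} (h1 : pvPLe a b) (h2 : pvPLe b c) : pvPLe a c := by
  unfold pvPLe at *; omega

theorem pvPLe_total (a b : Int × Int) : pvPLe a b ∨ pvPLe b a := by
  unfold pvPLe; omega

theorem pv_heapMin_mem (x : Int × Int) (l : List (Int × Int)) : pvHeapMin x l ∈ x :: l := by
  induction l generalizing x with
  | nil => simp [pvHeapMin]
  | cons y l ih =>
    have : pvHeapMin x (y :: l) = pvHeapMin (if pvPairLe x y then x else y) l := by
      simp [pvHeapMin]
    rw [this]
    rcases List.mem_cons.1 (ih (if pvPairLe x y then x else y)) with h | h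
    · rw [h]; split_ifs <;> simp
    · simp [h]

theorem pv_heapMin_le (x : Int × Int) (l : List (Int × Int)) :
    ∀ y ∈ x :: l, pvPLe (pvHeapMin x l) y := by
  induction l generalizing x with
  | nil =>
    intro y hy
    rw [List.mem_singleton] at hy
    subst hy
    exact pvPLe_refl y
  | cons z l ih =>
    have hrw : pvHeapMin x (z :: l) = pvHeapMin (if pvPairLe x z then x else z) l := by
      simp [pvHeapMin]
    intro y hy
    have hm := ih (if pvPairLe x z then x else z)
    have hxz : pvPLe (if pvPairLe x z then x else z) x ∧ pvPLe (if pvPairLe x z then x else z) z := by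
      by_cases h : pvPairLe x z = true
      · simp only [h, if_true]
        exact ⟨pvPLe_refl x, (pvPairLe_iff x z).1 h⟩
      · have : pvPLe z x := by
          rcases pvPLe_total x z with h' | h'
          · exact absurd ((pvPairLe_iff x z).2 h') h
          · exact h'
        simp only [h, if_false]
        exact ⟨this, pvPLe_refl z⟩
    have hself : pvPLe (pvHeapMin x (z :: l)) (if pvPairLe x z then x else z) := by
      rw [hrw]; exact hm _ (by simp)
    rcases hy with _ | hy
    · exact pvPLe_trans hself hxz.1
    · rename_i hy'
      rcases List.mem_cons.1 hy' with h | h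
      · subst h; exact pvPLe_trans hself hxz.2
      · rw [hrw]; exact hm _ (by simp [h])

-- the sequence of values heappop yields
def pvPopList : List (Int × Int) → List (Int × Int)
  | [] => []
  | x :: l => pvHeapMin x l :: pvPopList ((x :: l).erase (pvHeapMin x l))
termination_by pq => pq.length
decreasing_by
  have := List.length_erase_of_mem (pv_heapMin_mem x l)
  simp at this ⊢; omega

theorem pv_popList_perm (pq : List (Int × Int)) : (pvPopList pq).Perm pq := by
  induction pq using pvPopList.induct with
  | case1 => simp [pvPopList]
  | case2 x l ih =>
    rw [pvPopList]
    exact (ih.cons _).trans (List.perm_cons_erase (pv_heapMin_mem x l)).symm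

theorem pv_popList_pairwise (pq : List (Int × Int)) : (pvPopList pq).Pairwise pvPLe := by
  induction pq using pvPopList.induct with
  | case1 => simp [pvPopList]
  | case2 x l ih =>
    rw [pvPopList]
    refine List.Pairwise.cons (fun y hy => ?_) ih
    have hmem : y ∈ (x :: l).erase (pvHeapMin x l) :=
      (pv_popList_perm _).mem_iff.1 hy
    exact pv_heapMin_le x l y (List.mem_of_mem_erase hmem)

theorem pv_popLoop (pq : List (Int × Int)) (ns : List Int) :
    ∀ (a : Nat) (res : Int), pq.length + a ≤ ns.length →
    ((PySem.List.pyRange (a : Int) ((a : Int) + (pq.length : Int)) 1).foldl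
        (fun (st : Int × List (Int × Int)) i =>
          match pvHeapPop? st.2 with
          | some (m, rest) => (st.1 + (-m.1) * PySem.List.pyGetD ns i 0, rest)
          | none => st) (res, pq)).1
      = res + ((((pvPopList pq).map (fun m => -m.1)).zip (ns.drop a)).map (fun p => p.1 * p.2)).sum := by
  induction pq using pvPopList.induct with
  | case1 =>
    intro a res _
    simp [PySem.List.pyRange_one_eq_nil (by omega : (a : Int) + 0 ≤ a), pvPopList]
  | case2 x l ih =>
    intro a res hlen
    have hL : (x :: l).length = l.length + 1 := by simp
    have hcons : PySem.List.pyRange (a : Int) ((a : Int) + ((x :: l).length : Int)) 1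
        = (a : Int) :: PySem.List.pyRange ((a : Int) + 1) ((a : Int) + ((x :: l).length : Int)) 1 :=
      PySem.List.pyRange_one_cons (by push_cast; omega)
    have hpop : pvHeapPop? (x :: l) = some (pvHeapMin x l, (x :: l).erase (pvHeapMin x l)) := rfl
    have hel : ((x :: l).erase (pvHeapMin x l)).length = l.length := by
      have := List.length_erase_of_mem (pv_heapMin_mem x l)
      simp at this; simpa using this
    have hbound : ((x :: l).erase (pvHeapMin x l)).length + (a + 1) ≤ ns.length := by
      rw [hel]; simp at hlen; omega
    have hub : (a : Int) + ((x :: l).length : Int)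
        = ((a + 1 : Nat) : Int) + ((((x :: l).erase (pvHeapMin x l)).length : Nat) : Int) := by
      rw [hel, hL]; push_cast; omega
    simp only [hcons, List.foldl_cons, hpop]
    have happ := ih (a + 1) (res + (-(pvHeapMin x l).1) * PySem.List.pyGetD ns (a : Int) 0) hbound
    have hstart : (a : Int) + 1 = ((a + 1 : Nat) : Int) := by push_cast; ring
    rw [hstart, hub, happ]
    have hna : a < ns.length := by simp at hlen; omega
    have hget : PySem.List.pyGetD ns (a : Int) 0 = ns[a] := by
      simp [List.getElem?_eq_getElem hna]
    have hdrop : ns.drop a = ns[a] :: ns.drop (a + 1) := (List.getElem_cons_drop hna).symm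
    rw [pvPopList, hdrop]
    simp only [List.map_cons, List.zip_cons_cons, List.sum_cons, hget]
    ring

-- any ≥-ordered rearrangement of xs is sorted(xs, reverse=True)
theorem pv_desc_char (xs ys : List Int) (hperm : ys.Perm xs)
    (hpair : ys.Pairwise (fun a b => b ≤ a)) :
    ys = PySem.List.sorted xs (fun x => x) true := by
  apply PySem.List.eq_of_perm_of_pairwise_le_of_injective (key := fun x : Int => -x)
  · exact fun a b h => by simpa using h
  · exact hperm.trans (PySem.List.sorted_perm xs (fun x => x) true).symm
  · exact hpair.imp (by intro a b h; simpa using h)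
  · exact (PySem.List.sorted_pairwise_rev xs (fun x => x)).imp (by intro a b h; simpa using h)

theorem pv_desc_rev (xs : List Int) :
    PySem.List.sorted xs (fun x => x) true = (PySem.List.sorted xs (fun x => x) false).reverse := by
  symm
  apply pv_desc_char
  · exact (List.reverse_perm _).trans (PySem.List.sorted_perm xs (fun x => x) false)
  · rw [List.pairwise_reverse]
    exact PySem.List.sorted_pairwise xs (fun x => x)

theorem pv_zip_mul (l1 l2 : List Int) :
    List.map (fun p : Int × Int => p.1 * p.2) (l1.zip l2) = List.zipWith (· * ·) l1 l2 := by
  simp [List.zip, List.map_zipWith]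

-- ===== VERDICT (by name: the statement is the Claim_ definition above) =====
theorem maxSumRangeQuery2_spec : Claim_equal_maxSumRangeQuery2 := by
  intro nums requests _ hpre
  unfold Spec_maxSumRangeQuery2
  simp only [maxSumRangeQuery2, maxSumRangeQuery2_alt, PySem.List.len_eq,
    PySem.List.length_sorted,
    PySem.List.foldl_append_singleton_eq_map (fun p : Int × Int => ((-p.2 : Int), p.1)),
    List.nil_append]
  congr 1
  -- abbreviations
  set ca := List.foldl pvCountStep (List.replicate nums.length 0) requests with hca
  set d := List.foldl pvDiffStep (List.replicate (nums.length + 1) 0) requests with hd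
  set pq := List.map (fun p : Int × Int => ((-p.2 : Int), p.1)) (PySem.List.enumerate ca) with hpq
  have hlen_ca : ca.length = nums.length := by
    rw [hca, ← pv_counts_eq nums requests hpre]; simp
  have hlen_pq : pq.length = nums.length := by
    rw [hpq, List.length_map, PySem.List.length_enumerate, hlen_ca]
  -- B's prefix-sum loop computes the prefix sums of the final difference array
  rw [pv_prefix_loop d nums.length]
  have hcs : (List.range nums.length).map (fun j => ((d.take (j + 1)).sum)) = ca :=
    pv_counts_eq nums requests hpre
  rw [hcs]
  -- A's pop loop
  have hloop := pv_popLoop pq (PySem.List.sorted nums (fun x => x) true) 0 0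
    (by rw [hlen_pq, PySem.List.length_sorted]; omega)
  simp only [Nat.cast_zero, zero_add, List.drop_zero] at hloop
  rw [hloop]
  dsimp only
  -- the popped counts are the counts sorted descending
  have hXperm : List.Perm ((pvPopList pq).map (fun m : Int × Int => -m.1)) ca := by
    refine ((pv_popList_perm pq).map _).trans ?_
    rw [hpq, List.map_map]
    have : ((fun m : Int × Int => -m.1) ∘ fun p : Int × Int => ((-p.2 : Int), p.1))
        = fun p : Int × Int => p.2 := by funext p; simp
    rw [this, PySem.List.map_snd_enumerate]
  have hXpair : ((pvPopList pq).map (fun m : Int × Int => -m.1)).Pairwise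
      (fun a b : Int => b ≤ a) := by
    refine (pv_popList_pairwise pq).map _ (fun a b h => ?_)
    unfold pvPLe at h; omega
  rw [pv_desc_char ca _ hXperm hXpair, pv_desc_rev ca, pv_desc_rev nums]
  -- sum of elementwise products is invariant under reversing both lists
  rw [pv_zip_mul, pv_zip_mul,
    ← List.reverse_zipWith (by rw [PySem.List.length_sorted, PySem.List.length_sorted, hlen_ca]),
    List.sum_reverse]
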